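-- pv_equiv track=rewrite | github.com/zachpek/CS1010E | assignment_5.py | migrate
-- ===== SOURCE A (Python) =====
-- def migrate(society) :
--     '''
--     Causes a society to migrate based on the population census.
--
--     Parameters:
--         society (list): The given society.
--
--     Returns:
--         the resulting society after migration.
--     '''
--     n_rows = len(society)
--     count_per_row = []
--     resulting_soc = []
--
--     for r in range(n_rows):
--         count_per_row.append((society[r].count('*'), r))
--     count_per_row.sort(key=lambda pair: pair[0], reverse=True)
--
--     for _, r_to_insert in count_per_row:
--         resulting_soc.append(society[r_to_insert])
--
--     return resulting_soc
-- ===== SOURCE B (Python) =====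
-- def migrate(society):
--     '''Bucket (counting) sort: group rows by star count, then emit buckets from the
--     highest count down to 0.'''
--     if not society:
--         return []
--     buckets = {}
--     for row in society:
--         buckets.setdefault(row.count('*'), []).append(row)
--     result = []
--     for c in range(max(buckets), -1, -1):
--         result.extend(buckets.get(c, []))
--     return result
-- ===== Notes on version B (the rewrite author's own statement) =====
-- stated objective: alternative
-- what changed: Replaces the comparison sort over (count, index) pairs by a counting/bucket sort: one pass groups rows into a dict keyed by star count (preserving original order within a bucket), then the buckets are emitted from the maximum count down to 0.
import Mathlib
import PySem

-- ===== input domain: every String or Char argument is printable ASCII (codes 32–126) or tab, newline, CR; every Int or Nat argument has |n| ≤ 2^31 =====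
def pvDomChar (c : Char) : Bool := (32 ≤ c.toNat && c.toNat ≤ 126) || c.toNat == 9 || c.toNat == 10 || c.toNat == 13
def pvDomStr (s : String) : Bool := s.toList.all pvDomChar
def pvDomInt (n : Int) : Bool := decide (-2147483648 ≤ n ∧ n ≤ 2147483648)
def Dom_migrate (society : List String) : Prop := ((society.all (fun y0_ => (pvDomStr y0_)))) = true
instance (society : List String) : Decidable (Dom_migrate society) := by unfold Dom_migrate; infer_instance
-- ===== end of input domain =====

-- B replaces A's comparison sort over (count, index) pairs by a counting/bucket sort
-- (group rows by star count in a dict, emit buckets from the maximum count down to 0);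
-- objective: alternative algorithm, same result.


-- ===== PORT A =====
def migrate (society : List String) : List String :=
  let n_rows := PySem.List.len society
  let count_per_row := (PySem.List.pyRange 0 n_rows).foldl
    (fun acc r => acc ++ [((PySem.Str.count (PySem.List.pyGetD society r "") "*" : Int), r)]) []
  let count_per_row := PySem.List.sorted count_per_row (fun pair => pair.1) true
  count_per_row.foldl (fun acc p => acc ++ [PySem.List.pyGetD society p.2 ""]) []

-- ===== PORT B =====
def migrate_alt (society : List String) : List String :=
  if society = [] then []
  else
    let buckets := society.foldl
      (fun d row => PySem.Dict.modify d ((PySem.Str.count row "*" : Int)) [] (fun l => l ++ [row]))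
      PySem.Dict.empty
    match PySem.List.max? buckets.keys (fun k => k) with
    | none => []
    | some hi =>
        (PySem.List.pyRange hi (-1) (-1)).foldl (fun acc c => acc ++ PySem.Dict.getD buckets c []) []

-- ===== PRECONDITION & SPEC =====
def Spec_migrate (society : List String) (out : List String) : Prop := out = migrate_alt society
instance (society : List String) (out : List String) : Decidable (Spec_migrate society out) := by unfold Spec_migrate; infer_instance

-- ===== CLAIM (what is proved, stated in full; the proofs are below) =====
def Claim_equal_migrate : Prop := ∀ (society : List String), Dom_migrate society → Spec_migrate society (migrate society)

-- ===== LEMMAS AND PROOFS =====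

-- inserting an element the filter rejects does not change the filtered list
theorem filter_insertBy_of_neg {α : Type} (before : α → α → Bool) (p : α → Bool) (x : α)
    (acc : List α) (hx : p x = false) :
    (PySem.List.insertBy before x acc).filter p = acc.filter p := by
  induction acc with
  | nil => simp [PySem.List.insertBy, hx]
  | cons a as ih =>
    by_cases h : before x a = true
    · simp [PySem.List.insertBy, h, hx]
    · simp only [PySem.List.insertBy, if_neg h]
      simp only [List.filter_cons]
      rw [ih]

-- inserting an element with key c into a key-descending list appends it after the c-block
theorem filter_insertBy_of_pos {α : Type} (key : α → Int) (c : Int) (x : α)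
    (acc : List α) (hx : key x = c)
    (hacc : acc.Pairwise (fun a b => key b ≤ key a)) :
    (PySem.List.insertBy (fun a b => decide (key b < key a)) x acc).filter (fun y => key y == c)
      = acc.filter (fun y => key y == c) ++ [x] := by
  induction acc with
  | nil => simp [PySem.List.insertBy, hx]
  | cons a as ih =>
    rcases List.pairwise_cons.mp hacc with ⟨hle, htail⟩
    by_cases h : key a < key x
    · -- x is inserted in front; everything from here on has key < c
      have hfilter : (a :: as).filter (fun y => key y == c) = [] := by
        rw [List.filter_eq_nil_iff]
        intro b hb
        have : key b ≤ key a := by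
          rcases List.mem_cons.mp hb with rfl | hb
          · exact le_refl _
          · exact hle b hb
        simp only [beq_iff_eq]
        omega
      simp only [PySem.List.insertBy, decide_eq_true_eq, if_pos h]
      rw [show ((x :: a :: as).filter (fun y => key y == c))
            = (if (key x == c) then x :: ((a :: as).filter (fun y => key y == c))
               else (a :: as).filter (fun y => key y == c)) from by simp [List.filter_cons]]
      simp [hx, hfilter]
    · simp only [PySem.List.insertBy, decide_eq_true_eq, if_neg h]
      simp only [List.filter_cons]
      rw [ih htail]
      split <;> simp

-- stability of Python's reverse sort: the c-block is the original c-filtered subsequence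
theorem filter_sorted_rev {α : Type} (key : α → Int) (c : Int) (xs : List α) :
    (PySem.List.sorted xs key true).filter (fun x => key x == c)
      = xs.filter (fun x => key x == c) := by
  induction xs using List.reverseRecOn with
  | nil => simp [PySem.List.sorted]
  | append_singleton xs x ih =>
    have hstep : PySem.List.sorted (xs ++ [x]) key true
        = PySem.List.insertBy (fun a b => decide (key b < key a)) x (PySem.List.sorted xs key true) := by
      rw [PySem.List.sorted_rev_eq_foldl_insertBy, PySem.List.sorted_rev_eq_foldl_insertBy,
        List.foldl_append]
      rfl
    rw [hstep]
    by_cases hx : key x = c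
    · rw [filter_insertBy_of_pos key c x _ hx (PySem.List.sorted_pairwise_rev xs key), ih]
      simp [List.filter_append, hx]
    · rw [filter_insertBy_of_neg _ _ _ _ (by simp [hx]), ih]
      simp [List.filter_append, hx]

-- a key-descending list bounded by c splits into its c-block followed by the rest
theorem desc_split {α : Type} (key : α → Int) (c : Int) (zs : List α)
    (hz : zs.Pairwise (fun a b => key b ≤ key a)) (hb : ∀ x ∈ zs, key x ≤ c) :
    zs = zs.filter (fun x => key x == c) ++ zs.filter (fun x => !(key x == c)) := by
  induction zs with
  | nil => simp
  | cons a as ih =>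
    rcases List.pairwise_cons.mp hz with ⟨hle, htail⟩
    by_cases ha : key a = c
    · rw [List.filter_cons_of_pos (by simp [ha]), List.filter_cons_of_neg (by simp [ha]),
        List.cons_append]
      congr 1
      exact ih htail (fun x hx => hb x (List.mem_cons_of_mem a hx))
    · have halt : key a < c := lt_of_le_of_ne (hb a (List.mem_cons_self)) ha
      have h1 : (a :: as).filter (fun x => key x == c) = [] := by
        rw [List.filter_eq_nil_iff]
        intro b hbmem
        have : key b ≤ key a := by
          rcases List.mem_cons.mp hbmem with rfl | hbm
          · exact le_refl _
          · exact hle b hbm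
        simp only [beq_iff_eq]; omega
      have h2 : (a :: as).filter (fun x => !(key x == c)) = a :: as := by
        rw [List.filter_eq_self]
        intro b hbmem
        have hba : key b ≤ key a := by
          rcases List.mem_cons.mp hbmem with rfl | hbm
          · exact le_refl _
          · exact hle b hbm
        have : key b ≠ c := by omega
        simp [this]
      rw [h1, h2, List.nil_append]

-- a key-descending list is the concatenation of its key-blocks along any strictly
-- descending list of values covering its keys
theorem desc_eq_flatMap {α : Type} (key : α → Int) (D : List Int) (zs : List α)
    (hz : zs.Pairwise (fun a b => key b ≤ key a)) (hD : D.Pairwise (· > ·))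
    (hcov : ∀ x ∈ zs, key x ∈ D) :
    zs = D.flatMap (fun c => zs.filter (fun x => key x == c)) := by
  induction D generalizing zs with
  | nil =>
    cases zs with
    | nil => simp
    | cons a as => exact absurd (hcov a (List.mem_cons_self)) (by simp)
  | cons c D' ih =>
    rcases List.pairwise_cons.mp hD with ⟨hgt, hD'⟩
    have hb : ∀ x ∈ zs, key x ≤ c := by
      intro x hx
      rcases List.mem_cons.mp (hcov x hx) with h | h
      · omega
      · exact le_of_lt (hgt _ h)
    set S := zs.filter (fun x => !(key x == c)) with hS
    have hSpair : S.Pairwise (fun a b => key b ≤ key a) :=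
      List.Pairwise.sublist List.filter_sublist hz
    have hScov : ∀ x ∈ S, key x ∈ D' := by
      intro x hx
      rw [hS, List.mem_filter] at hx
      rcases List.mem_cons.mp (hcov x hx.1) with h | h
      · exact absurd h (by simpa using hx.2)
      · exact h
    have hinner : ∀ c' ∈ D', zs.filter (fun x => key x == c') = S.filter (fun x => key x == c') := by
      intro c' hc'
      have hne : c' ≠ c := by have := hgt c' hc'; omega
      rw [hS, List.filter_filter]
      apply List.filter_congr
      intro x _
      by_cases h : key x = c'
      · simp [h, hne]
      · simp [h]
    rw [List.flatMap_cons]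
    conv_lhs => rw [desc_split key c zs hz hb]
    congr 1
    rw [show (D'.flatMap fun c' => zs.filter (fun x => key x == c'))
          = D'.flatMap (fun c' => S.filter (fun x => key x == c')) from by
        unfold List.flatMap
        exact congrArg List.flatten (List.map_congr_left hinner)]
    exact ih S hSpair hD' hScov

-- Python's stable reverse sort as a flatMap of filters along a strictly descending cover
theorem sorted_rev_eq_flatMap {α : Type} (key : α → Int) (D : List Int) (xs : List α)
    (hD : D.Pairwise (· > ·)) (hcov : ∀ x ∈ xs, key x ∈ D) :
    PySem.List.sorted xs key true = D.flatMap (fun c => xs.filter (fun x => key x == c)) := by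
  have hcov' : ∀ x ∈ PySem.List.sorted xs key true, key x ∈ D := by
    intro x hx
    exact hcov x ((PySem.List.mem_sorted _ _ _ _).mp hx)
  have := desc_eq_flatMap key D (PySem.List.sorted xs key true)
    (PySem.List.sorted_pairwise_rev xs key) hD hcov'
  rw [this]
  unfold List.flatMap
  refine congrArg List.flatten (List.map_congr_left ?_)
  intro c _
  exact filter_sorted_rev key c xs


theorem migrate_eq (society : List String) : migrate society = migrate_alt society := by
  by_cases hnil : society = []
  · subst hnil; rfl
  · have hsoc : (PySem.List.pyRange 0 (PySem.List.len society)).map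
        (fun j => PySem.List.pyGetD society j "") = society :=
      PySem.List.map_pyGetD_pyRange_zero society ""
    -- abbreviations
    set k : String → Int := fun r => ((PySem.Str.count r "*" : Int)) with hk
    set g : Int → String := fun j => PySem.List.pyGetD society j "" with hg
    set R : List Int := PySem.List.pyRange 0 (PySem.List.len society) with hR
    set buckets := society.foldl
      (fun d row => PySem.Dict.modify d (k row) [] (fun l => l ++ [row]))
      PySem.Dict.empty with hbk
    -- bucket contents
    have hgetD : ∀ c, buckets.getD c [] = society.filter (fun r => k r == c) := by
      intro c
      rw [hbk, show (society.foldl (fun d row => PySem.Dict.modify d (k row) [] (fun l => l ++ [row])) PySem.Dict.empty)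
            = ((society.map (fun r => (k r, r))).foldl (fun d p => PySem.Dict.modify d p.1 [] (fun l => l ++ [p.2])) PySem.Dict.empty) from by
          rw [List.foldl_map]]
      rw [PySem.Dict.getD_foldl_modify_append, PySem.Dict.getD_empty, List.nil_append,
        List.filter_map, List.map_map]
      simp only [Function.comp_def]
      simp
    -- bucket keys
    have hkeys : buckets.keys = PySem.Set.update (PySem.Dict.empty : PySem.Dict Int (List String)).keys (society.map k) := by
      rw [hbk]
      exact PySem.Dict.keys_foldl_modify_key society k [] (fun _ row => fun l => l ++ [row]) _
    have hmemk : ∀ c, c ∈ buckets.keys ↔ c ∈ society.map k := by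
      intro c
      rw [hkeys, PySem.Set.mem_update]
      simp [PySem.Dict.keys_empty]
    have hkne : buckets.keys ≠ [] := by
      obtain ⟨r0, rest, rfl⟩ := List.exists_cons_of_ne_nil hnil
      intro h
      have : k r0 ∈ buckets.keys := (hmemk _).mpr (List.mem_map_of_mem List.mem_cons_self)
      rw [h] at this
      exact absurd this (List.not_mem_nil)
    obtain ⟨hi, hmax⟩ : ∃ hi, PySem.List.max? buckets.keys (fun k => k) = some hi := by
      cases hmx : PySem.List.max? buckets.keys (fun k => k) with
      | none => exact absurd ((PySem.List.max?_eq_none_iff _ _).mp hmx) hkne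
      | some hi => exact ⟨hi, rfl⟩
    have hhi0 : 0 ≤ hi := by
      have h := (hmemk hi).mp (PySem.List.max?_mem hmax)
      obtain ⟨r, _, hr⟩ := List.mem_map.mp h
      simp only [hk] at hr
      omega
    have hbound : ∀ r ∈ society, k r ≤ hi := by
      intro r hr
      exact PySem.List.max?_isMax hmax (k r) ((hmemk _).mpr (List.mem_map_of_mem hr))
    -- the descending count range
    set D : List Int := PySem.List.pyRange hi (-1) (-1) with hDdef
    have hDform : D = (List.range (hi + 1).toNat).map (fun j : Nat => hi + (-1) * (j : Int)) := by
      rw [hDdef]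
      unfold PySem.List.pyRange
      rw [if_neg (by norm_num)]
      have h1 : ¬ ((0:Int) < -1) := by norm_num
      have h2 : (-1:Int) < hi := by omega
      rw [if_neg h1, if_pos h2]
      have h3 : (hi - -1 + - -1 - 1) / - -1 = hi + 1 := by norm_num
      rw [h3]
    have hDpair : D.Pairwise (· > ·) := by
      rw [hDform]
      refine (List.pairwise_map).mpr (List.pairwise_lt_range.imp ?_)
      intro a b h
      omega
    have hDmem : ∀ c : Int, 0 ≤ c → c ≤ hi → c ∈ D := by
      intro c h0 hc
      rw [hDform, List.mem_map]
      refine ⟨(hi - c).toNat, List.mem_range.mpr (by omega), ?_⟩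
      omega
    -- A's result
    have hA : migrate society
        = (PySem.List.sorted (R.map (fun j => (k (g j), j))) (fun p => p.1) true).map
            (fun p => g p.2) := by
      simp only [migrate, PySem.List.foldl_append_singleton_eq_map, List.nil_append, hk, hg, hR]
    have hcovp : ∀ p ∈ R.map (fun j => (k (g j), j)), (fun p : Int × Int => p.1) p ∈ D := by
      intro p hp
      obtain ⟨j, hj, rfl⟩ := List.mem_map.mp hp
      have hmem : g j ∈ society := by
        rw [← hsoc]
        exact List.mem_map_of_mem hj
      have h0 : 0 ≤ k (g j) := by rw [hk]; positivity
      exact hDmem _ h0 (hbound _ hmem)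
    have hinner : ∀ c : Int,
        ((R.map (fun j => (k (g j), j))).filter (fun p => p.1 == c)).map (fun p => g p.2)
          = society.filter (fun r => k r == c) := by
      intro c
      conv_rhs => rw [← hsoc]
      rw [List.filter_map, List.filter_map, List.map_map]
      rfl
    rw [hA, sorted_rev_eq_flatMap (fun p : Int × Int => p.1) D _ hDpair hcovp, List.map_flatMap]
    -- B's result
    simp only [migrate_alt, if_neg hnil]
    rw [show society.foldl
          (fun d row => PySem.Dict.modify d ((PySem.Str.count row "*" : Int)) [] (fun l => l ++ [row]))
          PySem.Dict.empty = buckets from by rw [hbk, hk]]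
    rw [hmax]
    show _ = (PySem.List.pyRange hi (-1) (-1)).foldl (fun acc c => acc ++ buckets.getD c []) []
    rw [PySem.List.foldl_append_eq_flatMap, List.nil_append, ← hDdef]
    refine congrArg List.flatten (List.map_congr_left ?_)
    intro c _
    rw [hgetD c, hinner c]

-- ===== VERDICT (by name: the statement is the Claim_ definition above) =====
theorem migrate_spec : Claim_equal_migrate := by
  intro society _
  unfold Spec_migrate
  exact migrate_eq society
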